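-- pv_equiv track=rewrite | github.com/bartekk2908/R6_patch_notes_phrases_analysis | chart.py | sum_for_seasons_distribution
-- ===== SOURCE A (Python) =====
-- def sum_for_seasons_distribution(versions, values):
--     seasons_distribution = {}
--     for i in range(len(versions)):
--         season = '.'.join(versions[i].split('.')[:2])
--         if not seasons_distribution.get(season):
--             seasons_distribution[season] = 0
--         seasons_distribution[season] += values[i]
--
--     return list(seasons_distribution.keys()), list(seasons_distribution.values())
-- ===== SOURCE B (Python) =====
-- def sum_for_seasons_distribution(versions, values):
--     seasons = ['.'.join(v.split('.')[:2]) for v in versions]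
--     keys = list(dict.fromkeys(seasons))
--     return keys, [sum(values[i] for i, s in enumerate(seasons) if s == k) for k in keys]
-- ===== Notes on version B (the rewrite author's own statement) =====
-- stated objective: alternative
-- what changed: Drops A's incremental dict of running totals entirely: B precomputes the season-key list, dedups it with dict.fromkeys for the key order, and computes each sum by a per-key scan over the enumerated keys (nested scans instead of a single accumulating dict pass).
import Mathlib
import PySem

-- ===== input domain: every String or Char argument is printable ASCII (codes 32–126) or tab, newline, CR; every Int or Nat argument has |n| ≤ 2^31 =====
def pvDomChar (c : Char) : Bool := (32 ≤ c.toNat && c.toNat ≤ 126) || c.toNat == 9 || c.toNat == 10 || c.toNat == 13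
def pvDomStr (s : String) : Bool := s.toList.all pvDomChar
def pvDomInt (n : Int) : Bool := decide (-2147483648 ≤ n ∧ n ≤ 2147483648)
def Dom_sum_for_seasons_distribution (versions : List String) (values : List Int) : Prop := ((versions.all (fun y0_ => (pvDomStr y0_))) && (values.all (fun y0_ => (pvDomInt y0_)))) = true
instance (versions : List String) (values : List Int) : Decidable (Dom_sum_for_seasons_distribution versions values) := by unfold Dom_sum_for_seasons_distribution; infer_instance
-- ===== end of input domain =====

-- B drops A's accumulating dict of running totals: it dedups the precomputed season keys for the key order and computes each sum by a per-key scan (alternative decomposition, not faster).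

-- shared helper: '.'.join(v.split('.')[:2])  ('.' is a non-empty separator, so split? is always `some`)
def seasonKey (v : String) : String :=
  PySem.Str.join "." (PySem.List.slice ((PySem.Str.split? v ".").getD []) none (some 2))

-- ===== PORT A =====
-- the 'for i in range(len(versions))' loop building the dict
def loopA (versions : List String) (values : List Int) : PySem.Dict String Int :=
  (PySem.List.pyRange 0 (PySem.List.len versions) 1).foldl
    (fun d i =>
      let season := seasonKey (PySem.List.pyGetD versions i "")
      -- 'if not seasons_distribution.get(season)': truthiness of None-or-int
      let d := if (match d.get? season with | none => true | some v => v == 0) then d.insert season 0 else d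
      d.insert season (d.getD season 0 + PySem.List.pyGetD values i 0))
    PySem.Dict.empty

def sum_for_seasons_distribution (versions : List String) (values : List Int) : List String × List Int :=
  let d := loopA versions values
  (d.keys, d.values)

-- ===== PORT B =====
def sum_for_seasons_distribution_alt (versions : List String) (values : List Int) : List String × List Int :=
  let seasons := versions.map seasonKey
  let keys := PySem.List.dedup seasons
  (keys,
   keys.map (fun k =>
     (((PySem.List.enumerate seasons 0).filter (fun p => p.2 == k)).map
       (fun p => PySem.List.pyGetD values p.1 0)).sum))

-- ===== PRECONDITION & SPEC =====
-- A raises IndexError on values[i] when values is shorter than versions; exactly those inputs are excluded.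
def Pre_sum_for_seasons_distribution (versions : List String) (values : List Int) : Prop :=
  versions.length ≤ values.length
instance (versions : List String) (values : List Int) : Decidable (Pre_sum_for_seasons_distribution versions values) := by unfold Pre_sum_for_seasons_distribution; infer_instance
def pvWitness_sum_for_seasons_distribution : List String × List Int := (["Y1S1.2", "Y1S1.3", "Y2S4"], [3, 4, 5])

def Spec_sum_for_seasons_distribution (versions : List String) (values : List Int) (out : List String × List Int) : Prop := out = sum_for_seasons_distribution_alt versions values
instance (versions : List String) (values : List Int) (out : List String × List Int) : Decidable (Spec_sum_for_seasons_distribution versions values out) := by unfold Spec_sum_for_seasons_distribution; infer_instance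

-- ===== CLAIM (what is proved, stated in full; the proofs are below) =====
def Claim_equal_sum_for_seasons_distribution : Prop := ∀ (versions : List String) (values : List Int), Dom_sum_for_seasons_distribution versions values → Pre_sum_for_seasons_distribution versions values → Spec_sum_for_seasons_distribution versions values (sum_for_seasons_distribution versions values)

-- ===== LEMMAS AND PROOFS =====

-- A's conditional reset-to-0 followed by '+=' is exactly an insert of (old-or-0 + x).
theorem stepA_eq (d : PySem.Dict String Int) (s : String) (x : Int) :
    ((if (match d.get? s with | none => true | some v => v == 0) then d.insert s 0 else d).insert s
      ((if (match d.get? s with | none => true | some v => v == 0) then d.insert s 0 else d).getD s 0 + x))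
    = d.insert s (d.getD s 0 + x) := by
  rcases h : d.get? s with _ | v
  · have h0 : d.getD s 0 = 0 := by simp [PySem.Dict.getD_eq_get?_getD, h]
    simp [h0, PySem.Dict.getD_insert_self, PySem.Dict.insert_insert_self]
  · by_cases hv : v = 0
    · have h0 : d.getD s 0 = 0 := by simp [PySem.Dict.getD_eq_get?_getD, h, hv]
      simp [hv, h0, PySem.Dict.getD_insert_self, PySem.Dict.insert_insert_self]
    · simp [hv]

-- index loop over two parallel lists = fold over their zip
theorem foldl_range_zip {α : Type} (g : α → String → Int → α) :
    ∀ (vs : List String) (xs : List Int), vs.length ≤ xs.length → ∀ (init : α),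
      (List.range vs.length).foldl (fun d j => g d (vs.getD j "") (xs.getD j 0)) init
        = (vs.zip xs).foldl (fun d p => g d p.1 p.2) init := by
  intro vs
  induction vs with
  | nil => intro xs h init; simp
  | cons v vs ih =>
    intro xs h init
    cases xs with
    | nil => simp at h
    | cons x xs =>
      simp only [List.length_cons, List.range_succ_eq_map, List.foldl_cons, List.foldl_map,
        List.getD_cons_zero, List.getD_cons_succ, List.zip_cons_cons]
      exact ih xs (by simpa using h) (g init v x)

-- running-total characterisation of the insert-add fold
theorem getD_loop (l : List (String × Int)) :
    ∀ (d : PySem.Dict String Int) (k : String),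
      (l.foldl (fun d p => d.insert p.1 (d.getD p.1 0 + p.2)) d).getD k 0
        = d.getD k 0 + ((l.filter (fun p => p.1 == k)).map (fun p => p.2)).sum := by
  induction l with
  | nil => simp
  | cons p l ih =>
    intro d k
    simp only [List.foldl_cons, ih, List.filter_cons]
    by_cases hk : p.1 = k
    · simp [hk, PySem.Dict.getD_insert_self]; ring
    · have hk' : k ≠ p.1 := fun h => hk h.symm
      simp [PySem.Dict.getD_insert_of_ne d _ _ hk', hk]

-- A's dict equals the canonical insert-add fold over the keyed pairs
theorem loopA_eq (versions : List String) (values : List Int)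
    (h : versions.length ≤ values.length) :
    loopA versions values
    = ((versions.map seasonKey).zip values).foldl
        (fun d p => d.insert p.1 (d.getD p.1 0 + p.2)) PySem.Dict.empty := by
  unfold loopA
  simp only [PySem.List.len_eq, PySem.List.pyRange_zero_nat, List.foldl_map,
    PySem.List.pyGetD_natCast]
  calc (List.range versions.length).foldl
        (fun d (j : Nat) =>
          let season := seasonKey (versions.getD j "")
          let d' := if (match d.get? season with | none => true | some v => v == 0) then d.insert season 0 else d
          d'.insert season (d'.getD season 0 + values.getD j 0))
        PySem.Dict.empty
      = (List.range versions.length).foldl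
        (fun d j => d.insert (seasonKey (versions.getD j ""))
          (d.getD (seasonKey (versions.getD j "")) 0 + values.getD j 0)) PySem.Dict.empty := by
        exact PySem.List.foldl_congr_mem _ _ _ _
          (fun d j _ => stepA_eq d (seasonKey (versions.getD j "")) (values.getD j 0))
    _ = (versions.zip values).foldl
        (fun d p => d.insert (seasonKey p.1) (d.getD (seasonKey p.1) 0 + p.2)) PySem.Dict.empty :=
        foldl_range_zip (fun d s x => d.insert (seasonKey s) (d.getD (seasonKey s) 0 + x)) versions values h PySem.Dict.empty
    _ = ((versions.map seasonKey).zip values).foldl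
        (fun d p => d.insert p.1 (d.getD p.1 0 + p.2)) PySem.Dict.empty := by
        rw [List.zip_map_left, List.foldl_map]
        rfl

-- B's per-key scan over the enumerated keys, read against the full values list, is the
-- filtered-zip projection that characterises A's running totals (getD_loop).
theorem scan_eq_zip_filter (k : String) :
    ∀ (ss : List String) (n : Nat) (vs : List Int), n + ss.length ≤ vs.length →
      ((PySem.List.enumerate ss (n : Int)).filter (fun p => p.2 == k)).map
          (fun p => PySem.List.pyGetD vs p.1 0)
        = ((ss.zip (vs.drop n)).filter (fun p => p.1 == k)).map (fun p => p.2) := by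
  intro ss
  induction ss with
  | nil => intro n vs h; simp [PySem.List.enumerate_nil]
  | cons s ss ih =>
    intro n vs h
    have hn : n < vs.length := by simp at h; omega
    have hdrop : vs.drop n = vs[n] :: vs.drop (n + 1) := List.drop_eq_getElem_cons hn
    have hrec := ih (n + 1) vs (by simp at h ⊢; omega)
    have hcast : ((n : Int) + 1) = ((n + 1 : Nat) : Int) := by push_cast; ring
    rw [PySem.List.enumerate_cons, hdrop, hcast]
    simp only [List.filter_cons, List.zip_cons_cons]
    by_cases hk : s = k
    · subst hk
      simp only [BEq.rfl, if_true, List.map_cons, hrec]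
      congr 1
      simp [PySem.List.pyGetD_natCast, List.getD_eq_getElem?_getD, hn]
    · have hb : (s == k) = false := by simp [hk]
      simp only [hb, Bool.false_eq_true, if_false]
      exact hrec

-- ===== VERDICT (by name: the statement is the Claim_ definition above) =====
theorem sum_for_seasons_distribution_spec : Claim_equal_sum_for_seasons_distribution := by
  intro versions values _ hpre
  unfold Spec_sum_for_seasons_distribution
  simp only [sum_for_seasons_distribution, sum_for_seasons_distribution_alt,
    loopA_eq versions values hpre]
  set seasons := versions.map seasonKey with hs
  have hlen : seasons.length ≤ values.length := by simpa [hs] using hpre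
  set d := ((seasons.zip values).foldl (fun d p => d.insert p.1 (d.getD p.1 0 + p.2)) PySem.Dict.empty) with hd
  have hnodupd : d.keys.Nodup :=
    PySem.Dict.nodup_keys_foldl_insert_key (seasons.zip values) Prod.fst
      (fun d p => d.getD p.1 0 + p.2) PySem.Dict.empty PySem.Dict.nodup_keys_empty
  have hfst : (seasons.zip values).map Prod.fst = seasons := List.map_fst_zip hlen
  have hkeys : d.keys = PySem.List.dedup seasons := by
    have h3 : d.keys = PySem.Set.update (PySem.Dict.empty : PySem.Dict String Int).keys
        ((seasons.zip values).map Prod.fst) :=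
      PySem.Dict.keys_foldl_insert_key (seasons.zip values) Prod.fst
        (fun d p => d.getD p.1 0 + p.2) PySem.Dict.empty
    rw [h3, PySem.Dict.keys_empty, hfst, PySem.List.dedup_eq_ofList,
      PySem.Set.ofList_eq_foldl]
    rfl
  have hvals : d.values = (PySem.List.dedup seasons).map (fun k =>
      (((PySem.List.enumerate seasons 0).filter (fun p => p.2 == k)).map
        (fun p => PySem.List.pyGetD values p.1 0)).sum) := by
    rw [PySem.Dict.values_eq_map_keys d hnodupd 0, hkeys]
    refine List.map_congr_left ?_
    intro k _
    rw [hd, getD_loop]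
    have := scan_eq_zip_filter k seasons 0 values (by simpa using hlen)
    simp only [Nat.cast_zero, List.drop_zero] at this
    rw [show ((0 : Int)) = ((0 : Nat) : Int) by norm_num] at this ⊢
    rw [this]
    simp
  exact Prod.ext hkeys hvals
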